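-- pv_equiv track=rewrite | github.com/oigomezz/Retos | Hackerearth/Algorithms/String-Algorithm/Z-Algorithm/Prefix-Number/solution.py | calculate
-- ===== SOURCE A (Python) =====
-- def calculate(N):
--     ln = len(N)
--     a = [0] * ln
--     left = right = 0
--     for i in range(1, ln):
--         if i > right:
--             left = right = i
--             while right < ln and N[right - left] == N[right]:
--                 right += 1
--             a[i] = right - left
--             right -= 1
--         else:
--             if a[i - left] < right - i + 1:
--                 a[i] = a[i - left]
--             else:
--                 left = i
--                 while right < ln and N[right - left] == N[right]:
--                     right += 1
--                 a[i] = right - left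
--                 right -= 1
--
--     ways = 0
--     for i in range(1, len(a)):
--         ways += (a[i] >= i)
--
--     return ways
-- ===== SOURCE B (Python) =====
-- def calculate(N):
--     # Simpler: count i in [1, len(N)) whose length-i prefix reappears at i.
--     # Equivalent to Z[i] >= i; slice truncation handles 2*i > len(N).
--     return sum(N[:i] == N[i:2 * i] for i in range(1, len(N)))
-- ===== Notes on version B (the rewrite author's own statement) =====
-- stated objective: simpler
-- what changed: Replaced the hand-rolled Z-algorithm (Z-box maintenance plus a counting pass) by a one-line direct count of indices i where the length-i prefix equals the slice N[i:2*i].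
import Mathlib
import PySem

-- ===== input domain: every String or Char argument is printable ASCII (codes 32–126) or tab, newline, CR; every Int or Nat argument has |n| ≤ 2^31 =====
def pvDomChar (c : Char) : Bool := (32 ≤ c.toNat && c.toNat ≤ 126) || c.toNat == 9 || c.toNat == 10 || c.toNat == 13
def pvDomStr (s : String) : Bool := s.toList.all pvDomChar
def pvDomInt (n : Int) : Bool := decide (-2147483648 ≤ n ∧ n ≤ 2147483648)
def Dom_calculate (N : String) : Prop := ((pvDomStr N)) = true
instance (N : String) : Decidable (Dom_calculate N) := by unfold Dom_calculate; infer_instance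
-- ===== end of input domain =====

-- B replaces A's hand-rolled Z-algorithm by a direct count of indices i with
-- N[:i] == N[i:2*i] (simpler, not faster).

-- ===== PORT A =====
-- A's inner while loop: extend `right` while characters match.  During A's runs
-- both indices are in range, so `getD` reads mirror Python indexing exactly.
def calcExtend (s : List Char) (left right : Nat) : Nat :=
  if _h : right < s.length then
    if s.getD (right - left) ' ' = s.getD right ' ' then
      calcExtend s left (right + 1)
    else right
  else right
termination_by s.length - right

-- one iteration of A's main `for i in range(1, ln)` loop over state (a, left, right)
def calcStep (s : List Char) (st : List Nat × Nat × Nat) (i : Nat) :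
    List Nat × Nat × Nat :=
  match st with
  | (a, left, right) =>
    if right < i then
      let r := calcExtend s i i
      (a.set i (r - i), i, r - 1)
    else if a.getD (i - left) 0 < right - i + 1 then
      (a.set i (a.getD (i - left) 0), left, right)
    else
      let r := calcExtend s i right
      (a.set i (r - i), i, r - 1)

def calculate (N : String) : Int :=
  let s := N.toList
  let ln := s.length
  let st := (List.range' 1 (ln - 1)).foldl (calcStep s) (List.replicate ln 0, 0, 0)
  (List.range' 1 (ln - 1)).foldl
    (fun w i => w + (if i ≤ st.1.getD i 0 then (1 : Int) else 0)) 0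

-- ===== PORT B =====
-- Source B: sum(N[:i] == N[i:2*i] for i in range(1, len(N)))
def calculate_alt (N : String) : Int :=
  let s := N.toList
  (List.range' 1 (s.length - 1)).foldl
    (fun w i => w + (if s.take i = (s.drop i).take i then (1 : Int) else 0)) 0

-- ===== PRECONDITION & SPEC =====
def Spec_calculate (N : String) (out : Int) : Prop := out = calculate_alt N
instance (N : String) (out : Int) : Decidable (Spec_calculate N out) := by unfold Spec_calculate; infer_instance

-- ===== CLAIM (what is proved, stated in full; the proofs are below) =====
def Claim_equal_calculate : Prop := ∀ (N : String), Dom_calculate N → Spec_calculate N (calculate N)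

-- ===== LEMMAS AND PROOFS =====

-- length of the longest common prefix of two lists
def pvLcp : List Char → List Char → Nat
  | a :: as, b :: bs => if a = b then pvLcp as bs + 1 else 0
  | _, _ => 0

-- the Z-function: pvZ s i = length of the longest common prefix of s and s.drop i
def pvZ (s : List Char) (i : Nat) : Nat := pvLcp s (s.drop i)

lemma pvLcp_le_right : ∀ a b : List Char, pvLcp a b ≤ b.length := by
  intro a
  induction a with
  | nil => intro b; cases b <;> simp [pvLcp]
  | cons x xs ih =>
    intro b; cases b with
    | nil => simp [pvLcp]
    | cons y ys =>
      simp only [pvLcp, List.length_cons]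
      split
      · exact Nat.succ_le_succ (ih ys)
      · omega

lemma pvLcp_get : ∀ (a b : List Char) (m : Nat), m < pvLcp a b → a[m]? = b[m]? := by
  intro a
  induction a with
  | nil => intro b m h; cases b <;> simp [pvLcp] at h
  | cons x xs ih =>
    intro b m h
    cases b with
    | nil => simp [pvLcp] at h
    | cons y ys =>
      simp only [pvLcp] at h
      split at h
      · cases m with
        | zero => simp_all
        | succ m => simpa using ih ys m (by omega)
      · omega

lemma pvLcp_ne : ∀ (a b : List Char), pvLcp a b < a.length → pvLcp a b < b.length →
    a[pvLcp a b]? ≠ b[pvLcp a b]? := by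
  intro a
  induction a with
  | nil => intro b h _; simp at h
  | cons x xs ih =>
    intro b h1 h2
    cases b with
    | nil => simp at h2
    | cons y ys =>
      by_cases hxy : x = y
      · have he : pvLcp (x :: xs) (y :: ys) = pvLcp xs ys + 1 := by simp [pvLcp, hxy]
        rw [he] at h1 h2 ⊢
        simpa using ih ys (by simpa using h1) (by simpa using h2)
      · have he : pvLcp (x :: xs) (y :: ys) = 0 := by simp [pvLcp, hxy]
        rw [he]; simpa using hxy

lemma pvLcp_ge : ∀ (a b : List Char) (k : Nat), k ≤ a.length → k ≤ b.length →
    (∀ m, m < k → a[m]? = b[m]?) → k ≤ pvLcp a b := by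
  intro a
  induction a with
  | nil =>
    intro b k h _ _
    simp only [List.length_nil, Nat.le_zero] at h
    exact h ▸ Nat.zero_le _
  | cons x xs ih =>
    intro b k h1 h2 hm
    cases b with
    | nil => simp at h2; omega
    | cons y ys =>
      cases k with
      | zero => omega
      | succ k =>
        have hxy : x = y := by
          have := hm 0 (by omega); simpa using this
        have : k ≤ pvLcp xs ys := by
          refine ih ys k (by simpa using h1) (by simpa using h2) ?_
          intro m hmk
          have := hm (m + 1) (by omega)
          simpa using this
        simp [pvLcp, hxy]; omega

lemma pvZ_le (s : List Char) (i : Nat) : pvZ s i ≤ s.length - i := by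
  have := pvLcp_le_right s (s.drop i)
  simpa [pvZ] using this

lemma pvZ_pos_lt (s : List Char) (i : Nat) (h : 0 < pvZ s i) : i < s.length := by
  by_contra hc
  have : s.drop i = [] := List.drop_eq_nil_of_le (by omega)
  have := pvZ_le s i
  omega

lemma pvZ_get (s : List Char) (i m : Nat) (h : m < pvZ s i) : s[m]? = s[i + m]? := by
  have := pvLcp_get s (s.drop i) m h
  rwa [List.getElem?_drop] at this

lemma pvZ_ne (s : List Char) (i : Nat) (h : i + pvZ s i < s.length) :
    s[pvZ s i]? ≠ s[i + pvZ s i]? := by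
  have h1 : pvZ s i < s.length := by omega
  have h2 : pvZ s i < (s.drop i).length := by
    rw [List.length_drop]; omega
  have := pvLcp_ne s (s.drop i) h1 h2
  rwa [List.getElem?_drop] at this

lemma pvZ_ge (s : List Char) (i k : Nat) (h1 : i + k ≤ s.length)
    (h2 : ∀ m, m < k → s[m]? = s[i + m]?) : k ≤ pvZ s i := by
  refine pvLcp_ge s (s.drop i) k (by omega) (by rw [List.length_drop]; omega) ?_
  intro m hm
  rw [List.getElem?_drop]
  exact h2 m hm

lemma pvZ_add_le (s : List Char) (i : Nat) (h : 0 < pvZ s i) :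
    i + pvZ s i ≤ s.length := by
  have := pvZ_le s i
  have := pvZ_pos_lt s i h
  omega

-- the while loop computes left + Z(left), given that matches already cover [left, right)
lemma calcExtend_eq (s : List Char) (left : Nat) :
    ∀ n right, left ≤ right → right ≤ left + pvZ s left →
      left + pvZ s left - right = n → calcExtend s left right = left + pvZ s left := by
  intro n
  induction n with
  | zero =>
    intro right h1 h2 h0
    have hr : right = left + pvZ s left := by omega
    rw [calcExtend]
    split
    · next hlen =>
      have hne : s[pvZ s left]? ≠ s[left + pvZ s left]? := pvZ_ne s left (by omega)
      have hgd : ¬ (s.getD (right - left) ' ' = s.getD right ' ') := by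
        intro hgd
        apply hne
        have hi1 : pvZ s left < s.length := by omega
        have hi2 : left + pvZ s left < s.length := by omega
        rw [List.getD_eq_getElem?_getD, List.getD_eq_getElem?_getD] at hgd
        rw [List.getElem?_eq_getElem hi1, List.getElem?_eq_getElem hi2]
        have := hgd
        rw [hr] at this
        simp only [Nat.add_sub_cancel_left] at this
        rw [List.getElem?_eq_getElem hi1, List.getElem?_eq_getElem hi2] at this
        simpa using this
      rw [if_neg hgd, hr]
    · exact hr
  | succ n ih =>
    intro right h1 h2 h0
    have hlt : right < left + pvZ s left := by omega
    have hz : 0 < pvZ s left := by omega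
    have hlen : right < s.length := by
      have := pvZ_add_le s left hz; omega
    have hmatch : s[right - left]? = s[right]? := by
      have := pvZ_get s left (right - left) (by omega)
      have heq : left + (right - left) = right := by omega
      rwa [heq] at this
    rw [calcExtend, dif_pos hlen, if_pos]
    · exact ih (right + 1) (by omega) (by omega) (by omega)
    · have hi1 : right - left < s.length := by omega
      rw [List.getD_eq_getElem?_getD, List.getD_eq_getElem?_getD,
        List.getElem?_eq_getElem hi1, List.getElem?_eq_getElem hlen]
      rw [List.getElem?_eq_getElem hi1, List.getElem?_eq_getElem hlen] at hmatch
      simpa using hmatch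

-- Z-box copy rule: if k + Z(k) < Z(left) then Z(left + k) = Z(k)
lemma pvZ_copy (s : List Char) (left k : Nat) (h : k + pvZ s k < pvZ s left) :
    pvZ s (left + k) = pvZ s k := by
  have hzl : 0 < pvZ s left := by omega
  have hlen : left + pvZ s left ≤ s.length := pvZ_add_le s left hzl
  have hge : pvZ s k ≤ pvZ s (left + k) := by
    refine pvZ_ge s (left + k) (pvZ s k) (by omega) ?_
    intro m hm
    have e1 : s[m]? = s[k + m]? := pvZ_get s k m hm
    have e2 : s[k + m]? = s[left + (k + m)]? := pvZ_get s left (k + m) (by omega)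
    rw [e1, e2]; ring_nf
  have hle : pvZ s (left + k) ≤ pvZ s k := by
    by_contra hc
    have hm : s[pvZ s k]? = s[left + k + pvZ s k]? :=
      pvZ_get s (left + k) (pvZ s k) (by omega)
    have hne : s[pvZ s k]? ≠ s[k + pvZ s k]? := pvZ_ne s k (by omega)
    have e2 : s[k + pvZ s k]? = s[left + (k + pvZ s k)]? :=
      pvZ_get s left (k + pvZ s k) (by omega)
    apply hne
    rw [hm, e2]; ring_nf
  omega

-- Z lower bound through the box: matches at left for k+m chars and at k for m chars
lemma pvZ_ge_trans (s : List Char) (left k m : Nat)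
    (h1 : k + m ≤ pvZ s left) (h2 : m ≤ pvZ s k) : m ≤ pvZ s (left + k) := by
  rcases Nat.eq_zero_or_pos m with hm0 | hm0
  · omega
  have hzl : 0 < pvZ s left := by omega
  have hlen : left + pvZ s left ≤ s.length := pvZ_add_le s left hzl
  refine pvZ_ge s (left + k) m (by omega) ?_
  intro t ht
  have e1 : s[t]? = s[k + t]? := pvZ_get s k t (by omega)
  have e2 : s[k + t]? = s[left + (k + t)]? := pvZ_get s left (k + t) (by omega)
  rw [e1, e2]; ring_nf

-- loop invariant at the start of iteration i
def ZInv (s : List Char) (i : Nat) (st : List Nat × Nat × Nat) : Prop :=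
  st.1.length = s.length ∧ st.2.1 < i ∧
  (∀ j, 1 ≤ j → j < i → st.1.getD j 0 = pvZ s j) ∧
  (i ≤ st.2.2 → 1 ≤ st.2.1 ∧ st.2.2 + 1 = st.2.1 + pvZ s st.2.1)

lemma getD_set_self (a : List Nat) (i : Nat) (v : Nat) (h : i < a.length) :
    (a.set i v).getD i 0 = v := by
  rw [List.getD_eq_getElem?_getD, List.getElem?_set_self', List.getElem?_eq_getElem h]
  simp

lemma getD_set_ne (a : List Nat) (i j : Nat) (v : Nat) (h : i ≠ j) :
    (a.set i v).getD j 0 = a.getD j 0 := by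
  rw [List.getD_eq_getElem?_getD, List.getD_eq_getElem?_getD,
    List.getElem?_set_ne h]

lemma calcStep_inv (s : List Char) (i : Nat) (st : List Nat × Nat × Nat)
    (hInv : ZInv s i st) (hi1 : 1 ≤ i) (hiln : i < s.length) :
    ZInv s (i + 1) (calcStep s st i) := by
  obtain ⟨a, left, right⟩ := st
  obtain ⟨hlen, hlt, hval, hbox⟩ := hInv
  simp only at hlen hlt hval hbox
  have hia : i < a.length := by omega
  by_cases hbr : right < i
  · -- branch 1: fresh extension from i
    have hr : calcExtend s i i = i + pvZ s i :=
      calcExtend_eq s i (pvZ s i) i (le_refl i) (by omega) (by omega)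
    simp only [calcStep, if_pos hbr, hr]
    refine ⟨by simpa using hlen, ?_, ?_, ?_⟩
    · exact Nat.lt_succ_self i
    · intro j hj1 hj2
      by_cases hji : j = i
      · subst hji
        simp only
        rw [getD_set_self a j _ hia]
        omega
      · simp only
        rw [getD_set_ne a i j _ (by omega)]
        exact hval j hj1 (by omega)
    · intro hle
      simp only at hle ⊢
      constructor
      · omega
      · omega
  · -- i ≤ right: a valid Z-box [left, right]
    replace hbr : i ≤ right := by omega
    obtain ⟨hL1, hEq⟩ := hbox hbr
    have hik : left + (i - left) = i := by omega
    have hk1 : 1 ≤ i - left := by omega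
    have hkv : a.getD (i - left) 0 = pvZ s (i - left) := hval (i - left) hk1 (by omega)
    by_cases hc : a.getD (i - left) 0 < right - i + 1
    · -- copy branch
      have hcopy : pvZ s (left + (i - left)) = pvZ s (i - left) := by
        apply pvZ_copy
        omega
      rw [hik] at hcopy
      simp only [calcStep, if_neg (by omega : ¬ right < i), if_pos hc]
      refine ⟨by simpa using hlen, ?_, ?_, ?_⟩
      · exact Nat.lt_succ_of_lt hlt
      · intro j hj1 hj2
        by_cases hji : j = i
        · subst hji
          simp only
          rw [getD_set_self a j _ hia, hkv, ← hcopy]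
        · simp only
          rw [getD_set_ne a i j _ (by omega)]
          exact hval j hj1 (by omega)
      · intro hle
        simp only at hle ⊢
        exact ⟨hL1, hEq⟩
    · -- re-extension branch from i, continuing at right
      have hm : right + 1 - i ≤ pvZ s i := by
        have := pvZ_ge_trans s left (i - left) (right + 1 - i)
          (by omega) (by omega)
        rwa [hik] at this
      have hr : calcExtend s i right = i + pvZ s i :=
        calcExtend_eq s i (i + pvZ s i - right) right (by omega) (by omega) rfl
      simp only [calcStep, if_neg (by omega : ¬ right < i), if_neg hc, hr]
      refine ⟨by simpa using hlen, ?_, ?_, ?_⟩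
      · exact Nat.lt_succ_self i
      · intro j hj1 hj2
        by_cases hji : j = i
        · subst hji
          simp only
          rw [getD_set_self a j _ hia]
          omega
        · simp only
          rw [getD_set_ne a i j _ (by omega)]
          exact hval j hj1 (by omega)
      · intro hle
        simp only at hle ⊢
        constructor
        · omega
        · omega

lemma foldl_inv (s : List Char) :
    ∀ (n i : Nat) (st : List Nat × Nat × Nat), 1 ≤ i → i + n ≤ s.length →
      ZInv s i st → ZInv s (i + n) ((List.range' i n).foldl (calcStep s) st) := by
  intro n
  induction n with
  | zero => intro i st _ _ h; simpa using h
  | succ n ih =>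
    intro i st h1 h2 hInv
    rw [List.range'_succ, List.foldl_cons]
    have hstep := calcStep_inv s i st hInv h1 (by omega)
    have := ih (i + 1) (calcStep s st i) (by omega) (by omega) hstep
    have harith : i + (n + 1) = (i + 1) + n := by omega
    rwa [harith]

-- pvZ s i ≥ i  ⟺  the length-i prefix reappears at position i (B's test)
lemma pvZ_iff_take (s : List Char) (i : Nat) (_h1 : 1 ≤ i) (h2 : i < s.length) :
    (i ≤ pvZ s i) ↔ s.take i = (s.drop i).take i := by
  constructor
  · intro hz
    have hle : i + i ≤ s.length := by
      have := pvZ_le s i; omega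
    apply List.ext_getElem?
    intro n
    rw [List.getElem?_take, List.getElem?_take]
    by_cases hn : n < i
    · rw [if_pos hn, if_pos hn, List.getElem?_drop]
      exact pvZ_get s i n (by omega)
    · rw [if_neg hn, if_neg hn]
  · intro heq
    have hlen : (s.take i).length = ((s.drop i).take i).length := by rw [heq]
    rw [List.length_take, List.length_take, List.length_drop] at hlen
    have hii : i + i ≤ s.length := by omega
    refine pvZ_ge s i i hii ?_
    intro m hm
    have := congrArg (fun l => l[m]?) heq
    simp only [List.getElem?_take, List.getElem?_drop, if_pos hm] at this
    exact this

lemma foldl_add_congr (f g : Nat → Int) :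
    ∀ (l : List Nat) (acc : Int), (∀ i ∈ l, f i = g i) →
      l.foldl (fun w i => w + f i) acc = l.foldl (fun w i => w + g i) acc := by
  intro l
  induction l with
  | nil => intro acc _; rfl
  | cons x xs ih =>
    intro acc h
    simp only [List.foldl_cons]
    rw [h x (by simp)]
    exact ih _ (fun i hi => h i (by simp [hi]))

-- ===== VERDICT (by name: the statement is the Claim_ definition above) =====
theorem calculate_spec : Claim_equal_calculate := by
  intro N _hD
  unfold Spec_calculate calculate calculate_alt
  simp only
  set s := N.toList with hs
  rcases Nat.eq_zero_or_pos s.length with h0 | hpos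
  · rw [h0]; rfl
  · have hInit : ZInv s 1 (List.replicate s.length 0, 0, 0) := by
      refine ⟨by simp, by simp, ?_, ?_⟩
      · intro j hj1 hj2; omega
      · intro h; simp at h
    have hFin := foldl_inv s (s.length - 1) 1 (List.replicate s.length 0, 0, 0)
      (le_refl 1) (by omega) hInit
    have harith : 1 + (s.length - 1) = s.length := by omega
    rw [harith] at hFin
    obtain ⟨_, _, hval, _⟩ := hFin
    apply foldl_add_congr
    intro i hi
    rw [List.mem_range'_1] at hi
    obtain ⟨h1i, hiln⟩ := hi
    have hiln' : i < s.length := by omega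
    rw [hval i h1i hiln']
    by_cases hz : i ≤ pvZ s i
    · rw [if_pos hz, if_pos ((pvZ_iff_take s i h1i hiln').mp hz)]
    · rw [if_neg hz, if_neg (fun hc => hz ((pvZ_iff_take s i h1i hiln').mpr hc))]
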